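-- pv_equiv track=rewrite | github.com/raymondEhlers/mammoth | projects/jetscape/analysis_config_parsing/parse_yaml_to_PR_list.py | generate_parameters
-- ===== SOURCE A (Python) =====
-- import itertools
-- from collections.abc import Iterator
-- from typing import Any, Protocol
--
-- def generate_parameters(parameters: dict[str, list[Any]]) -> Iterator[tuple[str, dict[str, int]]]:
--     """Generate combinations of parameters that are relevant to the observable.
--
--     Note:
--         The bin indices are not meant to be comprehensive - just those that are
--         relevant for the observable.
--
--     Returns:
--         Description of parameters, bins associated with the parameters (e.g. pt).
--     """
--     # Add indices before each parameters:
--     # e.g. "pt": [[1, 2], [2, 3]] -> [(0, [1,2]), (1, [2,3])]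
--     # parameters_with_indices = {
--     #    p: [(i, v) for i, v in enumerate(values)] for p, values in parameters.items()
--     # }
--     # TODO(RJE): Grooming parameters are mutually exclusive, so we need to handle them one-by-one
--     # grooming_parameters
--     # We get the same combinations, but also with the indices.
--     indices = {p: list(range(len(values))) for p, values in parameters.items()}
--     # Get all combinations
--     combinations = itertools.product(*parameters.values())
--     indices_combinations = itertools.product(*indices.values())
--
--     # And then return them labeled by the parameter name
--     # We want: ({"pt": [], ...], {"pt": }})
--     yield from zip(
--         (dict(zip(parameters.keys(), values, strict=True)) for values in combinations),
--         (dict(zip(parameters.keys(), values, strict=True)) for values in indices_combinations),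
--         strict=True,
--     )
-- ===== SOURCE B (Python) =====
-- def generate_parameters(parameters):
--     """Recursive generator: builds each (values-dict, indices-dict) pair directly,
--     one parameter at a time, without itertools.product."""
--     items = list(parameters.items())
--
--     def build(pos):
--         if pos == len(items):
--             yield ({}, {})
--             return
--         key, values = items[pos]
--         for i, v in enumerate(values):
--             for value_dict, index_dict in build(pos + 1):
--                 yield ({key: v, **value_dict}, {key: i, **index_dict})
--
--     yield from build(0)
-- ===== Notes on version B (the rewrite author's own statement) =====
-- stated objective: alternative
-- what changed: B drops itertools entirely: a recursive generator walks the parameter list and emits each (values-dict, indices-dict) pair directly by prefixing the current key's (value, index) onto every combination of the remaining parameters, instead of A's two parallel itertools.product streams zipped back together.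
import Mathlib
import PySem

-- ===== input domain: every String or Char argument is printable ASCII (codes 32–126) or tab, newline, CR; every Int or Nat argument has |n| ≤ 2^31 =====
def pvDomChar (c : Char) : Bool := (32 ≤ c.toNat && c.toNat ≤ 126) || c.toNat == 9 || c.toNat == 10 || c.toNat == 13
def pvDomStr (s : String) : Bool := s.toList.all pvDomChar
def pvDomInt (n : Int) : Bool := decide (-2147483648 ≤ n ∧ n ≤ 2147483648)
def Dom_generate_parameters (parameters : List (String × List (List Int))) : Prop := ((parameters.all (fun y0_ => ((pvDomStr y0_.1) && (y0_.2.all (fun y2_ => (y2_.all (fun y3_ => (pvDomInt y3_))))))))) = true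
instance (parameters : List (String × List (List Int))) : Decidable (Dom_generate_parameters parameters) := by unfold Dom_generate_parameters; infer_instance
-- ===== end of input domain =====

-- B replaces A's two parallel itertools.product streams (values and index ranges, zipped
-- back together) by a recursive generator that builds each dict pair directly; objective: alternative.

-- ===== PORT A =====
-- itertools.product over a list of lists (A calls itertools.product twice)
def pyProduct {α : Type} : List (List α) → List (List α)
  | [] => [[]]
  | l :: ls => l.flatMap (fun x => (pyProduct ls).map (fun rest => x :: rest))

def generate_parameters (parameters : List (String × List (List Int))) : List ((List (String × List Int)) × (List (String × Int))) :=
  -- indices = {p: list(range(len(values))) ...}; combinations / indices_combinations; zip of the two labelled streams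
  let keys := parameters.map Prod.fst
  let combinations := pyProduct (parameters.map Prod.snd)
  let indices_combinations := pyProduct (parameters.map (fun p => PySem.List.pyRange 0 p.2.length 1))
  List.zip (combinations.map (fun values => keys.zip values))
           (indices_combinations.map (fun values => keys.zip values))

-- ===== PORT B =====
-- the recursive generator build(pos): recursion over the remaining items
def gpBuild : List (String × List (List Int)) → List ((List (String × List Int)) × (List (String × Int)))
  | [] => [([], [])]
  | (key, values) :: rest =>
      (PySem.List.enumerate values 0).flatMap (fun iv =>
        (gpBuild rest).map (fun pr => ((key, iv.2) :: pr.1, (key, iv.1) :: pr.2)))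

def generate_parameters_alt (parameters : List (String × List (List Int))) : List ((List (String × List Int)) × (List (String × Int))) :=
  gpBuild parameters

-- ===== PRECONDITION & SPEC =====
def Spec_generate_parameters (parameters : List (String × List (List Int))) (out : List ((List (String × List Int)) × (List (String × Int)))) : Prop := out = generate_parameters_alt parameters
instance (parameters : List (String × List (List Int))) (out : List ((List (String × List Int)) × (List (String × Int)))) : Decidable (Spec_generate_parameters parameters out) := by unfold Spec_generate_parameters; infer_instance

-- ===== CLAIM (what is proved, stated in full; the proofs are below) =====
def Claim_equal_generate_parameters : Prop := ∀ (parameters : List (String × List (List Int))), Dom_generate_parameters parameters → Spec_generate_parameters parameters (generate_parameters parameters)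

-- ===== LEMMAS AND PROOFS =====

-- mapping an element-wise function through the product commutes
theorem map_map_pyProduct {α β : Type} (f : α → β) (ls : List (List α)) :
    (pyProduct ls).map (List.map f) = pyProduct (ls.map (List.map f)) := by
  induction ls with
  | nil => simp [pyProduct]
  | cons l ls ih =>
      simp only [pyProduct, List.map_flatMap, List.map_map, Function.comp_def, List.map_cons, List.flatMap_map, ← ih]

theorem pyProduct_enum_snd (ls : List (List (List Int))) :
    (pyProduct (ls.map (fun l => PySem.List.enumerate l 0))).map (List.map Prod.snd)
      = pyProduct ls := by
  rw [map_map_pyProduct, List.map_map]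
  congr 1
  simp [Function.comp_def, PySem.List.map_snd_enumerate]

theorem pyProduct_enum_fst (ls : List (List (List Int))) :
    (pyProduct (ls.map (fun l => PySem.List.enumerate l 0))).map (List.map Prod.fst)
      = pyProduct (ls.map (fun l => PySem.List.pyRange 0 (l.length : Int) 1)) := by
  rw [map_map_pyProduct, List.map_map]
  congr 1
  simp [Function.comp_def, PySem.List.map_fst_enumerate]

-- B's recursion computes exactly "label each combination of the product of enumerated lists"
theorem gpBuild_eq_product (parameters : List (String × List (List Int))) :
    gpBuild parameters
      = (pyProduct (parameters.map (fun p => PySem.List.enumerate p.2 0))).map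
          (fun combo => ((parameters.map Prod.fst).zip (combo.map Prod.snd),
                         (parameters.map Prod.fst).zip (combo.map Prod.fst))) := by
  induction parameters with
  | nil => simp [gpBuild, pyProduct]
  | cons p ps ih =>
      obtain ⟨key, values⟩ := p
      simp [gpBuild, pyProduct, ih, List.map_flatMap, List.map_map, Function.comp_def]

theorem generate_parameters_spec : Claim_equal_generate_parameters := by
  intro parameters _
  have hsnd := pyProduct_enum_snd (parameters.map Prod.snd)
  have hfst := pyProduct_enum_fst (parameters.map Prod.snd)
  simp only [List.map_map, Function.comp_def] at hsnd hfst
  simp only [Spec_generate_parameters, generate_parameters, generate_parameters_alt,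
    gpBuild_eq_product]
  rw [← hsnd, ← hfst, List.map_map, List.map_map, List.zip_map']
  simp [Function.comp_def]
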